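-- pv_equiv track=rewrite | github.com/probinso/sexing-a-band | year_dict.py | group_years
-- ===== SOURCE A (Python) =====
-- from collections import defaultdict
--
-- def window(iterable, size):
--     it  = iter(iterable)
--     ret = [next(it) for _ in range(size)]
--
--     yield ret
--     for elm in it:
--         ret = ret[1:] + [elm]
--         yield ret
--
-- def group_years(reader):
--     d = defaultdict(int)
--     for A, B in window(reader, 2):
--         year, title, artist = A[:3]
--         if year[0] == '%':
--             continue
--         line = A[3:]
--
--         next_year = B[0]
--         for w, c in map(lambda s: s.split(':'), line[3:]):
--             d[w] += int(c)
--
--         if next_year != year: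
--             yield year, d
--             d = defaultdict(int)
--
--     yield year, d
-- ===== SOURCE B (Python) =====
-- def group_years(reader):
--     rows = list(reader)
--
--     def tally(chunk):
--         d = {}
--         for row in chunk:
--             if row[0].startswith('%'):
--                 continue
--             for tok in row[6:]:
--                 w, c = tok.split(':')
--                 d[w] = d.get(w, 0) + int(c)
--         return d
--
--     # stage 1: find the group boundaries (flush happens after row i when it is
--     # not a comment row and the next row's year differs)
--     bounds = []
--     start = 0
--     for i in range(len(rows) - 1):
--         if not rows[i][0].startswith('%') and rows[i + 1][0] != rows[i][0]:
--             bounds.append((start, i + 1))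
--             start = i + 1
--     # stage 2: aggregate each segment independently
--     for lo, hi in bounds:
--         yield rows[hi - 1][0], tally(rows[lo:hi])
--     yield rows[-2][0], tally(rows[start:-1])
-- ===== Notes on version B (the rewrite author's own statement) =====
-- stated objective: alternative
-- what changed: B replaces A's streaming sliding-window generator (defaultdict accumulated and flushed on the fly) by two staged passes: it first materializes the rows and computes the segment boundary index pairs in one scan, then aggregates each segment independently from a list slice with a plain dict.
import Mathlib
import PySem

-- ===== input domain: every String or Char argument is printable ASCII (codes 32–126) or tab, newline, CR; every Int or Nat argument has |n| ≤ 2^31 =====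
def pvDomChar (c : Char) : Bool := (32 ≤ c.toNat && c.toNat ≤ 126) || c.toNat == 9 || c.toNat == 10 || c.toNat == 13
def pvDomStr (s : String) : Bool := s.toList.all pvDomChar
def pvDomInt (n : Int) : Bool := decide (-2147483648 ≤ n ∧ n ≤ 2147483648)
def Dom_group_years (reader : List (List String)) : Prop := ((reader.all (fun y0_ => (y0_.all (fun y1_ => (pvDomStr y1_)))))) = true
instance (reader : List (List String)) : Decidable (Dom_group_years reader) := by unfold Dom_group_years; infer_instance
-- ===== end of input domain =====

-- B replaces A's streaming sliding-window pass by two staged passes (boundary indices first,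
-- then per-segment aggregation from slices); equivalence is on the returned list of
-- (year, dict) pairs; neither version mutates its argument.

-- ===== PORT A =====
-- window(reader, 2): ret = [next(it), next(it)]; yield ret; for elm in it: ret = ret[1:]+[elm]; yield ret
def pvWindowStep (st : List (List (List String)) × List (List String)) (elm : List String) :
    List (List (List String)) × List (List String) :=
  let ret := st.2.drop 1 ++ [elm]
  (st.1 ++ [ret], ret)

def pvWindow2 (xs : List (List String)) : List (List (List String)) :=
  match xs with
  | a :: b :: rest => (rest.foldl pvWindowStep ([[a, b]], [a, b]) ).1
  | _ => []   -- Python raises (StopIteration → RuntimeError) here; excluded by Pre_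

-- d[w] += int(c) for one pair [w, c] produced by s.split(':') (defaultdict(int))
def pvAddTok (d : PySem.Dict String Int) (p : List String) : PySem.Dict String Int :=
  match p with
  | [w, c] => d.modify w 0 (· + (PySem.Int.ofStr? c).getD 0)
  | _ => d   -- Python raises ValueError on the unpack / int(); excluded by Pre_

-- one iteration of A's 'for A, B in window(reader, 2)' loop; state = (yielded, d, year)
def pvStepA (st : List (String × List (String × Int)) × PySem.Dict String Int × String)
    (win : List (List String)) :
    List (String × List (String × Int)) × PySem.Dict String Int × String :=
  match win with
  | [A, B] =>
    match PySem.List.slice A none (some 3) with   -- year, title, artist = A[:3]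
    | [year, _title, _artist] =>
      if (PySem.Str.pyGet? year 0).getD ' ' = '%' then (st.1, st.2.1, year)  -- year[0] == '%': continue
      else
        let line := PySem.List.slice A (some 3) none
        let next_year := (PySem.List.pyGet? B 0).getD ""
        let d := ((PySem.List.slice line (some 3) none).map
                    (fun s => (PySem.Str.split? s ":").getD [])).foldl pvAddTok st.2.1
        if next_year ≠ year then (st.1 ++ [(year, d.items)], PySem.Dict.empty, year)
        else (st.1, d, year)
    | _ => st   -- ValueError on the unpack; excluded by Pre_
  | _ => st     -- unreachable: windows have length 2

def group_years (reader : List (List String)) : List (String × (List (String × Int))) :=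
  let st := (pvWindow2 reader).foldl pvStepA ([], PySem.Dict.empty, "")
  st.1 ++ [(st.2.2, st.2.1.items)]   -- trailing 'yield year, d'

-- ===== PORT B =====
-- d[w] = d.get(w, 0) + int(c) for token w:c
def pvAddTokB (d : PySem.Dict String Int) (t : String) : PySem.Dict String Int :=
  match (PySem.Str.split? t ":").getD [] with
  | [w, c] => d.insert w (d.getD w 0 + (PySem.Int.ofStr? c).getD 0)
  | _ => d   -- Python raises here; excluded by Pre_

def pvRowYear (rows : List (List String)) (i : Nat) : String := (rows.getD i []).headD ""

-- tally(chunk)'s loop body: skip comment rows, fold the w:c tokens of row[6:] into d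
def pvTallyRow (d : PySem.Dict String Int) (row : List String) : PySem.Dict String Int :=
  if PySem.Str.startswith (row.headD "") "%" then d
  else (row.drop 6).foldl pvAddTokB d

def pvTally (chunk : List (List String)) : PySem.Dict String Int :=
  chunk.foldl pvTallyRow PySem.Dict.empty

-- stage-1 loop body: 'if not rows[i][0].startswith("%") and rows[i+1][0] != rows[i][0]:
--   bounds.append((start, i+1)); start = i+1'; state = (bounds, start)
def pvBoundStep (rows : List (List String)) (st : List (Nat × Nat) × Nat) (i : Nat) :
    List (Nat × Nat) × Nat :=
  if ¬ PySem.Str.startswith (pvRowYear rows i) "%" = true ∧ pvRowYear rows (i + 1) ≠ pvRowYear rows i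
  then (st.1 ++ [(st.2, i + 1)], i + 1) else st

def group_years_alt (reader : List (List String)) : List (String × (List (String × Int))) :=
  -- rows = list(reader): the argument is already a materialized list, used directly
  -- 'for i in range(len(rows) - 1)': ported over Nat indices (exact: len(rows) ≥ 0)
  let st := (List.range (reader.length - 1)).foldl (pvBoundStep reader) ([], 0)
  (st.1.map (fun p => (pvRowYear reader (p.2 - 1),
      (pvTally (PySem.List.slice reader (some (p.1 : Int)) (some (p.2 : Int)))).items)))
  ++ [(((PySem.List.pyGet? reader (-2)).getD []).headD "",   -- rows[-2][0]; Pre_ gives ≥ 2 rows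
      (pvTally (PySem.List.slice reader (some (st.2 : Int)) (some (-1)))).items)]

-- ===== PRECONDITION & SPEC =====
-- Pre_ holds exactly where the Python A returns: at least two rows; every row but the last has
-- ≥ 3 fields and a nonempty year; for its non-'%' rows the following row is nonempty and every
-- field from index 6 on splits on ':' into exactly two parts with an int()-parsable count.
def pvTokOK (t : String) : Bool :=
  match (PySem.Str.split? t ":").getD [] with
  | [_, c] => (PySem.Int.ofStr? c).isSome
  | _ => false

def pvGoodRow (row : List String) : Bool :=
  decide (3 ≤ row.length) && (row.headD "" != "") &&
    (PySem.Str.startswith (row.headD "") "%" || (row.drop 6).all pvTokOK)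

def pvChain : List String → List String → List (List String) → Bool
  | A, B, [] => pvGoodRow A && (PySem.Str.startswith (A.headD "") "%" || B != [])
  | A, B, r :: rs =>
      pvGoodRow A && (PySem.Str.startswith (A.headD "") "%" || B != []) && pvChain B r rs

def Pre_group_years (reader : List (List String)) : Prop :=
  (match reader with
   | a :: b :: rest => pvChain a b rest
   | _ => false) = true
instance (reader : List (List String)) : Decidable (Pre_group_years reader) := by
  unfold Pre_group_years; infer_instance

def pvWitness_group_years : List (List String) := [["1999", "t", "ar"], ["1999"]]

def Spec_group_years (reader : List (List String)) (out : List (String × (List (String × Int)))) : Prop := out = group_years_alt reader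
instance (reader : List (List String)) (out : List (String × (List (String × Int)))) : Decidable (Spec_group_years reader out) := by unfold Spec_group_years; infer_instance

-- ===== CLAIM (what is proved, stated in full; the proofs are below) =====
def Claim_equal_group_years : Prop := ∀ (reader : List (List String)), Dom_group_years reader → Pre_group_years reader → Spec_group_years reader (group_years reader)

-- ===== LEMMAS AND PROOFS =====

-- the sequence of windows, as a structural recursion: [A,B], [B,r0], [r0,r1], …
def pvPairs : List String → List String → List (List String) → List (List (List String))
  | A, B, [] => [[A, B]]
  | A, B, r :: rs => [A, B] :: pvPairs B r rs

lemma pvWinFold (rest : List (List String)) :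
    ∀ (acc : List (List (List String))) (A B : List String),
      (rest.foldl pvWindowStep (acc ++ [[A, B]], [A, B])).1 = acc ++ pvPairs A B rest := by
  induction rest with
  | nil => intro acc A B; simp [pvPairs]
  | cons r rs ih =>
    intro acc A B
    have hstep : pvWindowStep (acc ++ [[A, B]], [A, B]) r
        = ((acc ++ [[A, B]]) ++ [[B, r]], [B, r]) := rfl
    simp only [List.foldl_cons, hstep, ih (acc ++ [[A, B]]) B r, pvPairs]
    simp

lemma pvWindow2_eq (a b : List String) (rest : List (List String)) :
    pvWindow2 (a :: b :: rest) = pvPairs a b rest := by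
  have := pvWinFold rest [] a b
  simpa [pvWindow2] using this

lemma pyGetD_head (B : List String) : (PySem.List.pyGet? B 0).getD "" = B.headD "" := by
  cases B <;> simp [PySem.List.pyGet?, PySem.List.pyIdx?]

lemma startswith_pct (s : String) (hne : s ≠ "") :
    ((PySem.Str.pyGet? s 0).getD ' ' = '%') = (PySem.Str.startswith s "%" = true) := by
  have hl : s.toList ≠ [] := by
    intro hl
    apply hne
    have := congrArg String.ofList hl
    rwa [String.ofList_toList] at this
  cases h : s.toList with
  | nil => exact absurd h hl
  | cons c cs =>
    have h1 : (PySem.Str.pyGet? s 0).getD ' ' = c := by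
      simp [h, PySem.List.pyGet?, PySem.List.pyIdx?]
    have h2 : (PySem.Str.startswith s "%" = true) = (c = '%') := by
      have hsw : PySem.Str.startswith s "%" = PySem.Chars.startswith (c :: cs) ['%'] := by
        simp [h]
      rw [hsw]
      apply propext
      rw [PySem.Chars.startswith_iff]
      constructor
      · rintro ⟨t, ht⟩; simpa using congrArg (List.headD · ' ') ht.symm
      · rintro rfl; exact ⟨cs, rfl⟩
    rw [h1, h2]

lemma addTok_eq (d : PySem.Dict String Int) (t : String) :
    pvAddTok d ((PySem.Str.split? t ":").getD []) = pvAddTokB d t := by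
  have hmi : ∀ (d : PySem.Dict String Int) (w : String) (v : Int),
      d.modify w 0 (· + v) = d.insert w (d.getD w 0 + v) := fun _ _ _ => rfl
  unfold pvAddTok pvAddTokB
  rcases h : (PySem.Str.split? t ":").getD [] with _ | ⟨w, _ | ⟨c, _ | ⟨x, xs⟩⟩⟩
  · rfl
  · rfl
  · simp only [hmi]
  · rfl

lemma tokfold_eq (l : List String) (d : PySem.Dict String Int) :
    (l.map (fun s => (PySem.Str.split? s ":").getD [])).foldl pvAddTok d = l.foldl pvAddTokB d := by
  rw [List.foldl_map]
  exact List.foldl_ext _ _ d (fun d' t _ => addTok_eq d' t)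

-- one step of A's loop, rewritten in B's token vocabulary (needs a well-formed row A)
lemma stepA_eq (out : List (String × List (String × Int))) (d : PySem.Dict String Int)
    (y : String) (A B : List String) (h3 : 3 ≤ A.length) (hne : A.headD "" ≠ "") :
    pvStepA (out, d, y) [A, B] =
      (if PySem.Str.startswith (A.headD "") "%" then (out, d, A.headD "")
       else
         if B.headD "" ≠ A.headD "" then
           (out ++ [(A.headD "", ((A.drop 6).foldl pvAddTokB d).items)], PySem.Dict.empty, A.headD "")
         else (out, (A.drop 6).foldl pvAddTokB d, A.headD "")) := by
  match A, h3 with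
  | a0 :: a1 :: a2 :: t, _ =>
    have hslice : PySem.List.slice (a0 :: a1 :: a2 :: t) none (some 3) = [a0, a1, a2] := by
      rw [PySem.List.slice_to _ (by norm_num)]; rfl
    have hd3 : PySem.List.slice (a0 :: a1 :: a2 :: t) (some 3) none = t := by
      rw [PySem.List.slice_from _ (by norm_num)]; rfl
    have hd6 : PySem.List.slice t (some 3) none = (a0 :: a1 :: a2 :: t).drop 6 := by
      rw [PySem.List.slice_from _ (by norm_num)]; rfl
    have hhd : (a0 :: a1 :: a2 :: t).headD "" = a0 := rfl
    rw [hhd] at hne ⊢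
    simp only [pvStepA, hslice, hd3, hd6, pyGetD_head, tokfold_eq,
      startswith_pct a0 hne]

-- streaming reference spec of A's loop, structural on the list of remaining rows
def pvGo : List String → List String → List (List String) → PySem.Dict String Int →
    List (String × (List (String × Int)))
  | A, B, [], d =>
    let year := A.headD ""
    let p := if PySem.Str.startswith year "%" then (([] : List (String × List (String × Int))), d)
             else
               let d2 := (A.drop 6).foldl pvAddTokB d
               if B.headD "" ≠ year then ([(year, d2.items)], PySem.Dict.empty) else ([], d2)
    p.1 ++ [(year, p.2.items)]
  | A, B, r :: rs, d =>
    let year := A.headD ""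
    let p := if PySem.Str.startswith year "%" then (([] : List (String × List (String × Int))), d)
             else
               let d2 := (A.drop 6).foldl pvAddTokB d
               if B.headD "" ≠ year then ([(year, d2.items)], PySem.Dict.empty) else ([], d2)
    p.1 ++ pvGo B r rs p.2

lemma pvMain (rest : List (List String)) :
    ∀ (A B : List String) (d : PySem.Dict String Int)
      (out : List (String × List (String × Int))) (y0 : String),
      pvChain A B rest = true →
      (let st := (pvPairs A B rest).foldl pvStepA (out, d, y0)
       st.1 ++ [(st.2.2, st.2.1.items)]) = out ++ pvGo A B rest d := by
  induction rest with
  | nil =>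
    intro A B d out y0 hc
    simp only [pvChain, Bool.and_eq_true] at hc
    obtain ⟨hg, _⟩ := hc
    simp only [pvGoodRow, Bool.and_eq_true, decide_eq_true_eq, bne_iff_ne, ne_eq] at hg
    simp only [pvPairs, List.foldl_cons, List.foldl_nil,
      stepA_eq out d y0 A B hg.1.1 hg.1.2, pvGo]
    split_ifs <;> simp
  | cons r rs ih =>
    intro A B d out y0 hc
    simp only [pvChain, Bool.and_eq_true] at hc
    obtain ⟨⟨hg, _⟩, htail⟩ := hc
    simp only [pvGoodRow, Bool.and_eq_true, decide_eq_true_eq, bne_iff_ne, ne_eq] at hg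
    simp only [pvPairs, List.foldl_cons, stepA_eq out d y0 A B hg.1.1 hg.1.2, pvGo]
    split_ifs with hp hb
    · rw [ih B r d out (A.headD "") htail]; simp
    · rw [ih B r PySem.Dict.empty
        (out ++ [(A.headD "", ((A.drop 6).foldl pvAddTokB d).items)]) (A.headD "") htail]
      simp
    · rw [ih B r ((A.drop 6).foldl pvAddTokB d) out (A.headD "") htail]; simp

-- the same streaming spec, indexed into the whole row list (k = windows still to process)
def pvG (rows : List (List String)) : Nat → Nat → PySem.Dict String Int →
    List (String × (List (String × Int)))
  | 0, _i, d => [(pvRowYear rows (rows.length - 2), d.items)]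
  | k + 1, i, d =>
    let year := pvRowYear rows i
    if PySem.Str.startswith year "%" then pvG rows k (i + 1) d
    else
      let d2 := ((rows.getD i []).drop 6).foldl pvAddTokB d
      if pvRowYear rows (i + 1) ≠ year then (year, d2.items) :: pvG rows k (i + 1) PySem.Dict.empty
      else pvG rows k (i + 1) d2

lemma getD_of_drop (rows : List (List String)) (i : Nat) (A : List String)
    (l : List (List String)) (h : rows.drop i = A :: l) : rows.getD i [] = A := by
  have : rows[i]? = some A := by
    rw [← List.head?_drop, h]; rfl
  simp [List.getD, this]

lemma go_eq_G (rows : List (List String)) (rest : List (List String)) :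
    ∀ (A B : List String) (d : PySem.Dict String Int) (i : Nat),
      rows.drop i = A :: B :: rest →
      pvGo A B rest d = pvG rows (rest.length + 1) i d := by
  induction rest with
  | nil =>
    intro A B d i h
    have hA : rows.getD i [] = A := getD_of_drop rows i A [B] h
    have hB : rows.getD (i + 1) [] = B := by
      apply getD_of_drop rows (i + 1) B []
      rw [← List.tail_drop, h]; rfl
    have hlen : rows.length = i + 2 := by
      have := List.length_drop (l := rows) (i := i)
      rw [h] at this; simp at this; omega
    have hi : rows.length - 2 = i := by omega
    have hA' : rows[i]? = some A := by rw [← List.head?_drop, h]; rfl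
    simp only [pvGo, pvG, pvRowYear, hA, hB]
    split_ifs <;> simp [pvG, pvRowYear, hi, List.getD, hA']
  | cons r rs ih =>
    intro A B d i h
    have hA : rows.getD i [] = A := getD_of_drop rows i A (B :: r :: rs) h
    have hB : rows.getD (i + 1) [] = B := by
      apply getD_of_drop rows (i + 1) B (r :: rs)
      rw [← List.tail_drop, h]; rfl
    have hnext : rows.drop (i + 1) = B :: r :: rs := by
      rw [← List.tail_drop, h]; rfl
    simp only [pvGo, pvG, pvRowYear, hA, hB]
    split_ifs with hp hb
    · exact ih B r d (i + 1) hnext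
    · simp only [List.length_cons]
      rw [ih B r PySem.Dict.empty (i + 1) hnext]
      rfl
    · simp only [List.length_cons]
      rw [ih B r ((A.drop 6).foldl pvAddTokB d) (i + 1) hnext]
      simp

-- stage-1 fold with a nonempty accumulator
lemma boundAcc (rows : List (List String)) (l : List Nat) :
    ∀ (acc : List (Nat × Nat)) (s : Nat),
      l.foldl (pvBoundStep rows) (acc, s)
        = (acc ++ (l.foldl (pvBoundStep rows) ([], s)).1, (l.foldl (pvBoundStep rows) ([], s)).2) := by
  induction l with
  | nil => intro acc s; simp
  | cons x xs ih =>
    intro acc s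
    simp only [List.foldl_cons, pvBoundStep]
    split_ifs
    · rw [ih (acc ++ [(s, x + 1)]) (x + 1)]
      simp only [List.nil_append]
      rw [ih [(s, x + 1)] (x + 1)]; simp
    · exact ih acc s

-- appending row i to the tally of rows[start:i]
lemma tally_snoc (rows : List (List String)) (start i : Nat) (hsi : start ≤ i)
    (hi : i < rows.length) :
    (rows.drop start).take (i + 1 - start) = (rows.drop start).take (i - start) ++ [rows.getD i []] := by
  have h1 : i + 1 - start = (i - start) + 1 := by omega
  rw [h1, List.take_add_one]
  have h2 : (rows.drop start)[i - start]? = some (rows.getD i []) := by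
    rw [List.getElem?_drop]
    have h3 : start + (i - start) = i := by omega
    rw [h3]
    have h4 : rows[i]? = some rows[i] := List.getElem?_eq_getElem hi
    rw [h4]
    simp [List.getD, h4]
  rw [h2]
  rfl

def pvSegOut (rows : List (List String)) (p : Nat × Nat) : String × List (String × Int) :=
  (pvRowYear rows (p.2 - 1), (pvTally ((rows.drop p.1).take (p.2 - p.1))).items)

-- stage 2 run on stage 1's final state
def pvStage2 (rows : List (List String)) (st : List (Nat × Nat) × Nat) :
    List (String × (List (String × Int))) :=
  st.1.map (pvSegOut rows)
    ++ [(pvRowYear rows (rows.length - 2),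
         (pvTally ((rows.drop st.2).take (rows.length - 1 - st.2))).items)]

-- the heart of the B-side proof: the streaming spec from window i with the tally of
-- rows[start:i] accumulated equals stage 2 run on stage 1's remaining fold
lemma pvMainB (rows : List (List String)) :
    ∀ (k i start : Nat), i + k + 1 = rows.length → start ≤ i →
      pvG rows k i (pvTally ((rows.drop start).take (i - start)))
        = pvStage2 rows ((List.range' i k).foldl (pvBoundStep rows) ([], start)) := by
  intro k
  induction k with
  | zero =>
    intro i start hlen hsi
    have : i - start = rows.length - 1 - start := by omega
    simp [pvG, pvStage2, this]
  | succ k ih =>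
    intro i start hlen hsi
    have hi : i < rows.length := by omega
    have hsnoc := tally_snoc rows start i hsi hi
    have htr : pvTally ((rows.drop start).take (i + 1 - start))
        = pvTallyRow (pvTally ((rows.drop start).take (i - start))) (rows.getD i []) := by
      rw [hsnoc]; simp [pvTally, List.foldl_append]
    simp only [List.range'_succ, List.foldl_cons, pvG]
    by_cases hp : PySem.Str.startswith (pvRowYear rows i) "%" = true
    · -- comment row: no boundary, tally unchanged
      have hstep : pvBoundStep rows ([], start) i = ([], start) := by
        simp only [pvBoundStep]; rw [if_neg]; rintro ⟨hns, _⟩; exact hns hp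
      have hpc : PySem.Str.startswith ((rows.getD i []).headD "") "%" = true := hp
      have hd : pvTally ((rows.drop start).take (i + 1 - start))
          = pvTally ((rows.drop start).take (i - start)) := by
        rw [htr]; exact if_pos hpc
      rw [hstep, if_pos hp, ← hd, ih (i + 1) start (by omega) (by omega)]
    · have hpc : ¬ PySem.Str.startswith ((rows.getD i []).headD "") "%" = true := hp
      by_cases hb : pvRowYear rows (i + 1) ≠ pvRowYear rows i
      · -- flush: boundary (start, i+1), fresh tally
        have hstep : pvBoundStep rows ([], start) i = ([(start, i + 1)], i + 1) := by
          simp only [pvBoundStep]; rw [if_pos ⟨hp, hb⟩]; simp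
        have hd2 : ((rows.getD i []).drop 6).foldl pvAddTokB
              (pvTally ((rows.drop start).take (i - start)))
            = pvTally ((rows.drop start).take (i + 1 - start)) := by
          rw [htr]; exact (if_neg hpc).symm
        have hempty : (PySem.Dict.empty : PySem.Dict String Int)
            = pvTally ((rows.drop (i + 1)).take ((i + 1) - (i + 1))) := by
          simp [pvTally]
        rw [hstep, if_neg hp, if_pos hb, hd2, hempty,
          ih (i + 1) (i + 1) (by omega) (le_refl _),
          boundAcc rows (List.range' (i + 1) k) [(start, i + 1)] (i + 1)]
        simp [pvStage2, pvSegOut]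
      · -- same year: no boundary, tally grows
        have hstep : pvBoundStep rows ([], start) i = ([], start) := by
          simp only [pvBoundStep]; rw [if_neg]; rintro ⟨_, hne⟩; exact hb hne
        have hd2 : ((rows.getD i []).drop 6).foldl pvAddTokB
              (pvTally ((rows.drop start).take (i - start)))
            = pvTally ((rows.drop start).take (i + 1 - start)) := by
          rw [htr]; exact (if_neg hpc).symm
        rw [hstep, if_neg hp, if_neg hb, hd2, ih (i + 1) start (by omega) (by omega)]

lemma slice_nat_neg_one (xs : List (List String)) (a : Nat) (ha : a ≤ xs.length) :
    PySem.List.slice xs (some (a : Int)) (some (-1)) = (xs.drop a).take (xs.length - 1 - a) := by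
  simp only [PySem.List.slice, Int.reduceNeg, Order.lt_one_iff, PySem.List.clampIdx_neg_ofNat,
    Nat.cast_nonneg, PySem.List.clampIdx_of_nonneg, Int.toNat_natCast]
  rw [Nat.min_eq_left ha]

-- stage-1 invariant: every recorded bound and the final start stay ≤ n-1
lemma bound_le (rows : List (List String)) (l : List Nat) :
    ∀ (acc : List (Nat × Nat)) (s m : Nat), s ≤ m → (∀ x ∈ l, x + 1 ≤ m) →
      (∀ p ∈ acc, p.1 ≤ m ∧ p.2 ≤ m) →
      (∀ p ∈ (l.foldl (pvBoundStep rows) (acc, s)).1, p.1 ≤ m ∧ p.2 ≤ m)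
        ∧ (l.foldl (pvBoundStep rows) (acc, s)).2 ≤ m := by
  induction l with
  | nil => intro acc s m hs _ hacc; exact ⟨hacc, hs⟩
  | cons x xs ih =>
    intro acc s m hs hl hacc
    simp only [List.foldl_cons, pvBoundStep]
    have hx : x + 1 ≤ m := hl x (by simp)
    split_ifs
    · exact ih (acc ++ [(s, x + 1)]) (x + 1) m hx (fun y hy => hl y (by simp [hy]))
        (by intro p hp
            rcases List.mem_append.1 hp with h | h
            · exact hacc p h
            · simp at h; subst h; exact ⟨hs, hx⟩)
    · exact ih acc s m hs (fun y hy => hl y (by simp [hy])) hacc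

-- ===== VERDICT (by name: the statement is the Claim_ definition above) =====
theorem group_years_spec : Claim_equal_group_years := by
  intro reader _hdom hpre
  unfold Spec_group_years
  match reader with
  | [] => exact absurd hpre (by simp [Pre_group_years])
  | [a] => exact absurd hpre (by simp [Pre_group_years])
  | a :: b :: rest =>
    have hc : pvChain a b rest = true := hpre
    set rows : List (List String) := a :: b :: rest with hrows
    have hn : rows.length = rest.length + 2 := by simp [hrows]
    have hn1 : rows.length - 1 = rest.length + 1 := by omega
    -- A side: fold over the windows = streaming spec
    have hA : group_years rows = pvGo a b rest PySem.Dict.empty := by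
      show group_years (a :: b :: rest) = _
      unfold group_years
      rw [pvWindow2_eq]
      simpa using pvMain rest a b PySem.Dict.empty [] "" hc
    -- indexed streaming spec
    have hG : pvGo a b rest PySem.Dict.empty = pvG rows (rest.length + 1) 0 PySem.Dict.empty :=
      go_eq_G rows rest a b PySem.Dict.empty 0 (by simp [hrows])
    -- B side: staged passes = indexed streaming spec
    have hMB := pvMainB rows (rest.length + 1) 0 0 (by omega) (le_refl 0)
    have h0 : pvTally ((rows.drop 0).take 0) = PySem.Dict.empty := by simp [pvTally]
    rw [h0] at hMB
    -- bounds on the recorded segment ends and the final start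
    have hbounds := bound_le rows (List.range (rows.length - 1)) [] 0 (rows.length - 1)
      (by omega)
      (by intro x hx; simp [List.mem_range] at hx; omega)
      (by intro p hp; simp at hp)
    rw [hA, hG, hMB]
    show pvStage2 rows ((List.range' 0 (rest.length + 1)).foldl (pvBoundStep rows) ([], 0))
        = group_years_alt rows
    simp only [group_years_alt]
    rw [List.range_eq_range', hn1]
    generalize hF : (List.range' 0 (rest.length + 1)).foldl (pvBoundStep rows) ([], 0) = F
    rw [List.range_eq_range', hn1, hF] at hbounds
    simp only [pvStage2]
    congr 1
    · apply List.map_congr_left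
      intro p _hp
      simp only [pvSegOut, PySem.List.slice_natCast]
    · rw [slice_nat_neg_one rows F.2 (by have := hbounds.2; omega)]
      have hneg2 : ((PySem.List.pyGet? rows (-2)).getD []).headD ""
          = pvRowYear rows (rows.length - 2) := by
        rw [PySem.List.pyGet?_neg_ofNat rows 2 (by omega) (by omega)]
        have hg : rows[rows.length - 2]? = some rows[rows.length - 2] :=
          List.getElem?_eq_getElem (by omega)
        rw [hg]
        simp [pvRowYear, List.getD, hg]
      rw [hneg2]
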